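-- pv_equiv track=rewrite | github.com/rafaederli/mit-intro-cs | lecture16-recursion-on-non-numerics/fel16.py | in_list_of_lists
-- ===== SOURCE A (Python) =====
-- def in_list_of_lists(L, e):
--     """
--     L is a list whose elements are lists containing ints.
--     Returns True if e is an element within the lists of L and False otherwise
--     """
--     if (e in L[0]):
--         return True
--     else:
--         if len(L) > 1:
--             return in_list_of_lists(L[1:], e)
--         else:
--             return False
-- ===== SOURCE B (Python) =====
-- def in_list_of_lists(L, e):
--     for sub in L:
--         if e in sub:
--             return True
--     return False
-- ===== Notes on version B (the rewrite author's own statement) =====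
-- stated objective: idiomatic
-- what changed: Replaces the head-check-then-tail-recursion on slices L[1:] with a single iterative loop over the sublists returning on first match.
import Mathlib
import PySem

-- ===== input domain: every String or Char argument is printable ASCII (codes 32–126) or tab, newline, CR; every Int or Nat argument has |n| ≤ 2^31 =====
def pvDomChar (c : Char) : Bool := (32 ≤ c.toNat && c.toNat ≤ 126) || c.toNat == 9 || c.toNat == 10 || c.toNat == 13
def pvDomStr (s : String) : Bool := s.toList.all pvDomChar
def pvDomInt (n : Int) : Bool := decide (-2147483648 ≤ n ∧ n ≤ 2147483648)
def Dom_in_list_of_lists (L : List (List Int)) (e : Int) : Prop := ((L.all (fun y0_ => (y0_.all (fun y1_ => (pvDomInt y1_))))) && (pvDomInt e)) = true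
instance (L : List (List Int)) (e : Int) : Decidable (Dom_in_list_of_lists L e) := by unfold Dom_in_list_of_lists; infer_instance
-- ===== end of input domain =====

-- B replaces A's head-check-plus-tail-recursion on slices with one iterative loop over the sublists (idiomatic).
-- On empty L, A raises IndexError (excluded by Pre_) while B returns False.

-- ===== PORT A =====
-- L[1:] on a cons cell is the tail; the [] case is Python's IndexError from L[0], excluded by Pre_.
def in_list_of_lists (L : List (List Int)) (e : Int) : Bool :=
  match L with
  | [] => false          -- L[0] raises IndexError here; outside Pre_
  | h :: t =>
    if h.contains e then true
    else if t.length > 0 then in_list_of_lists t e   -- len(L) > 1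
    else false

-- ===== PORT B =====
def in_list_of_lists_alt (L : List (List Int)) (e : Int) : Bool :=
  L.any (fun sub => sub.contains e)

-- ===== PRECONDITION & SPEC =====
-- Pre_ excludes exactly the empty list, on which A raises IndexError (L[0]).
def Pre_in_list_of_lists (L : List (List Int)) (e : Int) : Prop := L ≠ []
instance (L : List (List Int)) (e : Int) : Decidable (Pre_in_list_of_lists L e) := by unfold Pre_in_list_of_lists; infer_instance
def pvWitness_in_list_of_lists : List (List Int) × Int := ([[1, 2], [3]], 3)

def Spec_in_list_of_lists (L : List (List Int)) (e : Int) (out : Bool) : Prop := out = in_list_of_lists_alt L e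
instance (L : List (List Int)) (e : Int) (out : Bool) : Decidable (Spec_in_list_of_lists L e out) := by unfold Spec_in_list_of_lists; infer_instance

-- ===== CLAIM =====
def Claim_equal_in_list_of_lists : Prop := ∀ (L : List (List Int)) (e : Int), Dom_in_list_of_lists L e → Pre_in_list_of_lists L e → Spec_in_list_of_lists L e (in_list_of_lists L e)

-- ===== LEMMAS AND PROOFS =====
theorem in_list_of_lists_eq_alt (L : List (List Int)) (e : Int) (h : L ≠ []) :
    in_list_of_lists L e = in_list_of_lists_alt L e := by
  induction L with
  | nil => exact absurd rfl h
  | cons hd tl ih =>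
    cases tl with
    | nil => simp [in_list_of_lists, in_list_of_lists_alt]
    | cons a b =>
      show (if hd.contains e then true
            else if (a :: b).length > 0 then in_list_of_lists (a :: b) e else false) = _
      rw [ih (by simp)]
      simp only [in_list_of_lists_alt, List.any_cons, List.length_cons]
      by_cases hc : e ∈ hd <;> simp [hc]

-- ===== VERDICT =====
theorem in_list_of_lists_spec : Claim_equal_in_list_of_lists := by
  intro L e _ hpre
  exact in_list_of_lists_eq_alt L e hpre
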